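-- pv_equiv track=rewrite | github.com/joeplattenburg/advent_of_code | 2024/problem_08.py | antinodes_from_pair
-- ===== SOURCE A (Python) =====
-- Location = tuple[int, int]
--
-- def antinodes_from_pair(
--         a1: Location, a2: Location, grid_shape: tuple[int, int], allow_harmonics: bool
-- ) -> list[Location]:
--     out = []
--     dy, dx = a2[0] - a1[0], a2[1] - a1[1]
--     if allow_harmonics:
--         n = 0
--         while True:
--             test_loc = a2[0] + n * dy, a2[1] + n * dx
--             if on_grid(test_loc, grid_shape):
--                 out.append(test_loc)
--             else:
--                 break
--             n += 1
--         n = 0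
--         while True:
--             test_loc = a1[0] - n * dy, a1[1] - n * dx
--             if on_grid(test_loc, grid_shape):
--                 out.append(test_loc)
--             else:
--                 break
--             n += 1
--     else:
--         test_loc = (a2[0] + dy, a2[1] + dx)
--         if on_grid(test_loc, grid_shape):
--             out.append(test_loc)
--         test_loc = (a1[0] - dy, a1[1] - dx)
--         if on_grid(test_loc, grid_shape):
--             out.append(test_loc)
--     return out
--
-- def on_grid(loc: Location, grid_shape: tuple[int, int]) -> bool:
--     return (0 <= loc[0] < grid_shape[0]) and (0 <= loc[1] < grid_shape[1])
-- ===== SOURCE B (Python) =====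
-- # Closed-form rays: compute the run length arithmetically instead of stepping point by point.
-- Location = tuple[int, int]
--
-- def on_grid(loc, grid_shape):
--     return (0 <= loc[0] < grid_shape[0]) and (0 <= loc[1] < grid_shape[1])
--
-- def _ray(p, sy, sx, grid_shape):
--     """Contiguous run p, p+s, p+2s, ... while on the grid, computed in closed form."""
--     if not on_grid(p, grid_shape):
--         return []
--     bounds = []
--     if sy > 0:
--         bounds.append((grid_shape[0] - 1 - p[0]) // sy)
--     elif sy < 0:
--         bounds.append(p[0] // (-sy))
--     if sx > 0:
--         bounds.append((grid_shape[1] - 1 - p[1]) // sx)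
--     elif sx < 0:
--         bounds.append(p[1] // (-sx))
--     nmax = min(bounds) if bounds else 0
--     return [(p[0] + n * sy, p[1] + n * sx) for n in range(nmax + 1)]
--
-- def antinodes_from_pair(a1, a2, grid_shape, allow_harmonics):
--     dy, dx = a2[0] - a1[0], a2[1] - a1[1]
--     if allow_harmonics:
--         return _ray(a2, dy, dx, grid_shape) + _ray(a1, -dy, -dx, grid_shape)
--     return [p for p in ((a2[0] + dy, a2[1] + dx), (a1[0] - dy, a1[1] - dx))
--             if on_grid(p, grid_shape)]
-- ===== Notes on version B (the rewrite author's own statement) =====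
-- stated objective: alternative
-- what changed: Replaces A's two point-by-point while loops with a closed-form computation: for each ray the largest in-grid step count nmax is obtained by floor division against the grid bounds and the run is built with one range comprehension; the non-harmonic branch is a comprehension over the two candidate points.
import Mathlib
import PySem

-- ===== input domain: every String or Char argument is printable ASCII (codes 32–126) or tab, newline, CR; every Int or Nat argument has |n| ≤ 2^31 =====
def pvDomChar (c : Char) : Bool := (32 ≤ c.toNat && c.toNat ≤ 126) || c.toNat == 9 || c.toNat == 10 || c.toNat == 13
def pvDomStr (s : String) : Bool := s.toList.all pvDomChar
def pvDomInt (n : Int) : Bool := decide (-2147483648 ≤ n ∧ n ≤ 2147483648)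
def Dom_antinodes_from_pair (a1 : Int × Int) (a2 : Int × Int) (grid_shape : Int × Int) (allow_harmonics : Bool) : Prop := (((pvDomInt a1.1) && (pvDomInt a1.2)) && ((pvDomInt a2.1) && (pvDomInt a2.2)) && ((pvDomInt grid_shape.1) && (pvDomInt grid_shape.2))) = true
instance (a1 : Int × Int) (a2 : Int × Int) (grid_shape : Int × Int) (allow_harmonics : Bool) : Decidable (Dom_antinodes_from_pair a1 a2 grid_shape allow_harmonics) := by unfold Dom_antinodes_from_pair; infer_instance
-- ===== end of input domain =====

-- B replaces A's step-by-step while loops by a closed-form run length per ray.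
-- ===== PORT A =====
def pvOnGrid (loc : Int × Int) (grid_shape : Int × Int) : Bool :=
  (0 ≤ loc.1 && loc.1 < grid_shape.1) && (0 ≤ loc.2 && loc.2 < grid_shape.2)

-- A's 'while True' loop: test_loc = base + n*d (the second loop's 'a1 - n*dy' is passed
-- as the step (-dy, -dx), the same values). The fuel only makes the same computation
-- total; it exceeds the iteration count on every input Pre_ admits.
def pvLoopA (base : Int × Int) (d : Int × Int) (grid_shape : Int × Int)
    (n : Int) (acc : List (Int × Int)) : Nat → List (Int × Int)
  | 0 => acc
  | fuel + 1 =>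
    let t : Int × Int := (base.1 + n * d.1, base.2 + n * d.2)
    if pvOnGrid t grid_shape then pvLoopA base d grid_shape (n + 1) (acc ++ [t]) fuel
    else acc

def antinodes_from_pair (a1 : Int × Int) (a2 : Int × Int) (grid_shape : Int × Int) (allow_harmonics : Bool) : List (Int × Int) :=
  let dy := a2.1 - a1.1
  let dx := a2.2 - a1.2
  if allow_harmonics then
    let fuel := grid_shape.1.toNat + grid_shape.2.toNat + 2
    let out := pvLoopA a2 (dy, dx) grid_shape 0 [] fuel
    pvLoopA a1 (-dy, -dx) grid_shape 0 out fuel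
  else
    let t1 : Int × Int := (a2.1 + dy, a2.2 + dx)
    let out := if pvOnGrid t1 grid_shape then [t1] else []
    let t2 : Int × Int := (a1.1 - dy, a1.2 - dx)
    if pvOnGrid t2 grid_shape then out ++ [t2] else out

-- ===== PORT B =====
-- _ray from Source B: closed-form run length nmax by floor division, then one range comprehension.
def pvRayAlt (p : Int × Int) (sy sx : Int) (grid_shape : Int × Int) : List (Int × Int) :=
  if pvOnGrid p grid_shape then
    let bounds : List Int :=
      (if sy > 0 then [PySem.Int.floordiv (grid_shape.1 - 1 - p.1) sy]
       else if sy < 0 then [PySem.Int.floordiv p.1 (-sy)] else []) ++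
      (if sx > 0 then [PySem.Int.floordiv (grid_shape.2 - 1 - p.2) sx]
       else if sx < 0 then [PySem.Int.floordiv p.2 (-sx)] else [])
    let nmax := match PySem.List.min? bounds (fun x => x) with
      | some m => m
      | none => 0
    (PySem.List.pyRange 0 (nmax + 1) 1).map (fun n => (p.1 + n * sy, p.2 + n * sx))
  else []

def antinodes_from_pair_alt (a1 : Int × Int) (a2 : Int × Int) (grid_shape : Int × Int) (allow_harmonics : Bool) : List (Int × Int) :=
  let dy := a2.1 - a1.1
  let dx := a2.2 - a1.2
  if allow_harmonics then
    pvRayAlt a2 dy dx grid_shape ++ pvRayAlt a1 (-dy) (-dx) grid_shape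
  else
    ([(a2.1 + dy, a2.2 + dx), (a1.1 - dy, a1.2 - dx)] : List (Int × Int)).filter
      (fun p => pvOnGrid p grid_shape)

-- ===== PRECONDITION & SPEC =====
-- Pre_ excludes exactly the inputs on which Python A does not return: with allow_harmonics,
-- a1 = a2 lying on the grid makes A's first while loop spin forever on the same point.
def Pre_antinodes_from_pair (a1 : Int × Int) (a2 : Int × Int) (grid_shape : Int × Int) (allow_harmonics : Bool) : Prop :=
  ¬ (allow_harmonics = true ∧ a1 = a2 ∧ pvOnGrid a1 grid_shape = true)
instance (a1 : Int × Int) (a2 : Int × Int) (grid_shape : Int × Int) (allow_harmonics : Bool) : Decidable (Pre_antinodes_from_pair a1 a2 grid_shape allow_harmonics) := by unfold Pre_antinodes_from_pair; infer_instance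

def pvWitness_antinodes_from_pair : (Int × Int) × (Int × Int) × (Int × Int) × Bool :=
  ((0, 0), (1, 1), (4, 4), true)

def Spec_antinodes_from_pair (a1 : Int × Int) (a2 : Int × Int) (grid_shape : Int × Int) (allow_harmonics : Bool) (out : List (Int × Int)) : Prop := out = antinodes_from_pair_alt a1 a2 grid_shape allow_harmonics
instance (a1 : Int × Int) (a2 : Int × Int) (grid_shape : Int × Int) (allow_harmonics : Bool) (out : List (Int × Int)) : Decidable (Spec_antinodes_from_pair a1 a2 grid_shape allow_harmonics out) := by unfold Spec_antinodes_from_pair; infer_instance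

-- ===== CLAIM (what is proved, stated in full; the proofs are below) =====
def Claim_equal_antinodes_from_pair : Prop := ∀ (a1 : Int × Int) (a2 : Int × Int) (grid_shape : Int × Int) (allow_harmonics : Bool), Dom_antinodes_from_pair a1 a2 grid_shape allow_harmonics → Pre_antinodes_from_pair a1 a2 grid_shape allow_harmonics → Spec_antinodes_from_pair a1 a2 grid_shape allow_harmonics (antinodes_from_pair a1 a2 grid_shape allow_harmonics)

-- ===== LEMMAS AND PROOFS =====

-- The n-th ray point is on the grid iff n is below every active floor-division bound
-- (for 0 ≤ n and the anchor itself on the grid).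
theorem pvOnGrid_ray_iff (p : Int × Int) (sy sx : Int) (gs : Int × Int)
    (hp : pvOnGrid p gs = true) (n : Int) (hn : 0 ≤ n) :
    pvOnGrid (p.1 + n * sy, p.2 + n * sx) gs = true ↔
      ((sy > 0 → n ≤ PySem.Int.floordiv (gs.1 - 1 - p.1) sy) ∧
       (sy < 0 → n ≤ PySem.Int.floordiv p.1 (-sy)) ∧
       (sx > 0 → n ≤ PySem.Int.floordiv (gs.2 - 1 - p.2) sx) ∧
       (sx < 0 → n ≤ PySem.Int.floordiv p.2 (-sx))) := by
  simp only [pvOnGrid, Bool.and_eq_true, decide_eq_true_eq] at hp ⊢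
  have axis : ∀ (q m s : Int), 0 ≤ q → q < m →
      ((0 ≤ q + n * s ∧ q + n * s < m) ↔
        ((s > 0 → n ≤ PySem.Int.floordiv (m - 1 - q) s) ∧
         (s < 0 → n ≤ PySem.Int.floordiv q (-s)))) := by
    intro q m s hq hm
    rcases lt_trichotomy s 0 with hs | hs | hs
    · have hpos : (0:Int) < -s := by omega
      rw [PySem.Int.le_floordiv_iff_mul_le hpos]
      have h1 : n * s ≤ 0 := mul_nonpos_of_nonneg_of_nonpos hn (le_of_lt hs)
      have h2 : n * -s = -(n * s) := by ring
      constructor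
      · rintro ⟨hl, hr⟩
        exact ⟨fun h => absurd h (by omega), fun _ => by omega⟩
      · rintro ⟨-, h⟩
        have := h hs
        omega
    · subst hs; simp; omega
    · rw [PySem.Int.le_floordiv_iff_mul_le hs]
      have h1 : 0 ≤ n * s := mul_nonneg hn (le_of_lt hs)
      constructor
      · rintro ⟨hl, hr⟩
        exact ⟨fun _ => by omega, fun h => absurd h (by omega)⟩
      · rintro ⟨h, -⟩
        have := h hs
        omega
  have hY := axis p.1 gs.1 sy hp.1.1 hp.1.2
  have hX := axis p.2 gs.2 sx hp.2.1 hp.2.2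
  tauto

-- Generic run lemma: if the on-grid test holds up to N and fails at N + 1, the fueled
-- loop appends exactly the points for n = k … N.
theorem pvLoopA_run (base d gs : Int × Int) (N : Int)
    (hP : ∀ n : Int, 0 ≤ n → n ≤ N → pvOnGrid (base.1 + n * d.1, base.2 + n * d.2) gs = true)
    (hStop : pvOnGrid (base.1 + (N + 1) * d.1, base.2 + (N + 1) * d.2) gs = false) :
    ∀ (fuel : Nat) (k : Int) (acc : List (Int × Int)), 0 ≤ k → k ≤ N + 1 →
      (N + 1 - k).toNat < fuel →
      pvLoopA base d gs k acc fuel =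
        acc ++ (PySem.List.pyRange k (N + 1) 1).map
          (fun n => (base.1 + n * d.1, base.2 + n * d.2)) := by
  intro fuel
  induction fuel with
  | zero => intro k acc _ _ hf; omega
  | succ f ih =>
    intro k acc hk0 hkN hf
    by_cases hk : k ≤ N
    · have hPk := hP k hk0 hk
      simp only [pvLoopA, hPk, if_true]
      rw [ih (k + 1) (acc ++ [(base.1 + k * d.1, base.2 + k * d.2)]) (by omega) (by omega) (by omega)]
      rw [PySem.List.pyRange_one_cons (by omega : k < N + 1)]
      simp
    · have hkeq : k = N + 1 := by omega
      subst hkeq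
      simp only [pvLoopA, hStop, if_false, Bool.false_eq_true]
      rw [PySem.List.pyRange_one_eq_nil (by omega)]
      simp

-- A's fueled loop equals B's closed-form ray (anchor + step not the degenerate
-- on-grid fixed point, which Pre_ excludes).
theorem pvLoopA_eq_ray (p : Int × Int) (sy sx : Int) (gs : Int × Int)
    (hdeg : ¬ ((sy, sx) = ((0 : Int), (0 : Int)) ∧ pvOnGrid p gs = true))
    (acc : List (Int × Int)) :
    pvLoopA p (sy, sx) gs 0 acc (gs.1.toNat + gs.2.toNat + 2) =
      acc ++ pvRayAlt p sy sx gs := by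
  by_cases hp : pvOnGrid p gs = true
  case neg =>
    have hp' : pvOnGrid p gs = false := by simpa using hp
    simp only [pvRayAlt, hp', if_false, Bool.false_eq_true]
    have h0 : pvOnGrid (p.1 + 0 * sy, p.2 + 0 * sx) gs = false := by
      simpa using hp'
    simp only [pvLoopA, h0, Bool.false_eq_true, if_false]
    simp
  case pos =>
    have hs : ¬ (sy = 0 ∧ sx = 0) := by
      intro ⟨h1, h2⟩; exact hdeg ⟨by simp [h1, h2], hp⟩
    set BY : List Int :=
      (if sy > 0 then [PySem.Int.floordiv (gs.1 - 1 - p.1) sy]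
       else if sy < 0 then [PySem.Int.floordiv p.1 (-sy)] else []) with hBY
    set BX : List Int :=
      (if sx > 0 then [PySem.Int.floordiv (gs.2 - 1 - p.2) sx]
       else if sx < 0 then [PySem.Int.floordiv p.2 (-sx)] else []) with hBX
    have hgrid : 0 ≤ p.1 ∧ p.1 < gs.1 ∧ 0 ≤ p.2 ∧ p.2 < gs.2 := by
      simp only [pvOnGrid, Bool.and_eq_true, decide_eq_true_eq] at hp; tauto
    -- every bound is ≥ 0 and bounded by one of the grid axes
    have hBspec : ∀ b ∈ BY ++ BX, 0 ≤ b ∧ (b ≤ gs.1 - 1 ∨ b ≤ gs.2 - 1) := by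
      intro b hb
      have key : ∀ (a s lim : Int), 0 < s → 0 ≤ a → a ≤ lim →
          0 ≤ PySem.Int.floordiv a s ∧ PySem.Int.floordiv a s ≤ lim := by
        intro a s lim hspos ha halim
        constructor
        · rw [PySem.Int.le_floordiv_iff_mul_le hspos]; omega
        · have h2 : PySem.Int.floordiv a s < a + 1 := by
            rw [PySem.Int.floordiv_lt_iff_lt_mul hspos]
            have := mul_le_mul_of_nonneg_left hspos (by omega : (0:Int) ≤ a + 1)
            nlinarith
          omega
      rw [List.mem_append] at hb
      rcases hb with hb | hb
      · rw [hBY] at hb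
        split_ifs at hb with h1 h2 <;> simp at hb
        · subst hb
          exact ⟨(key _ _ (gs.1-1) h1 (by omega) (by omega)).1,
                 Or.inl (key _ _ (gs.1-1) h1 (by omega) (by omega)).2⟩
        · subst hb
          exact ⟨(key _ _ (gs.1-1) (by omega) (by omega) (by omega)).1,
                 Or.inl (key _ _ (gs.1-1) (by omega) (by omega) (by omega)).2⟩
      · rw [hBX] at hb
        split_ifs at hb with h1 h2 <;> simp at hb
        · subst hb
          exact ⟨(key _ _ (gs.2-1) h1 (by omega) (by omega)).1,
                 Or.inr (key _ _ (gs.2-1) h1 (by omega) (by omega)).2⟩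
        · subst hb
          exact ⟨(key _ _ (gs.2-1) (by omega) (by omega) (by omega)).1,
                 Or.inr (key _ _ (gs.2-1) (by omega) (by omega) (by omega)).2⟩
    have hmemY1 : sy > 0 → PySem.Int.floordiv (gs.1 - 1 - p.1) sy ∈ BY ++ BX := by
      intro h
      have e : BY = [PySem.Int.floordiv (gs.1 - 1 - p.1) sy] := by rw [hBY, if_pos h]
      rw [e]; exact List.mem_append_left _ (by simp)
    have hmemY2 : sy < 0 → PySem.Int.floordiv p.1 (-sy) ∈ BY ++ BX := by
      intro h
      have e : BY = [PySem.Int.floordiv p.1 (-sy)] := by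
        rw [hBY, if_neg (by omega), if_pos h]
      rw [e]; exact List.mem_append_left _ (by simp)
    have hmemX1 : sx > 0 → PySem.Int.floordiv (gs.2 - 1 - p.2) sx ∈ BY ++ BX := by
      intro h
      have e : BX = [PySem.Int.floordiv (gs.2 - 1 - p.2) sx] := by rw [hBX, if_pos h]
      rw [e]; exact List.mem_append_right _ (by simp)
    have hmemX2 : sx < 0 → PySem.Int.floordiv p.2 (-sx) ∈ BY ++ BX := by
      intro h
      have e : BX = [PySem.Int.floordiv p.2 (-sx)] := by
        rw [hBX, if_neg (by omega), if_pos h]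
      rw [e]; exact List.mem_append_right _ (by simp)
    have hne : BY ++ BX ≠ [] := by
      have hex : ∃ b, b ∈ BY ++ BX := by
        rcases lt_trichotomy sy 0 with h | h | h
        · exact ⟨_, hmemY2 h⟩
        · rcases lt_trichotomy sx 0 with h' | h' | h'
          · exact ⟨_, hmemX2 h'⟩
          · exact absurd ⟨h, h'⟩ hs
          · exact ⟨_, hmemX1 h'⟩
        · exact ⟨_, hmemY1 h⟩
      obtain ⟨b, hb⟩ := hex
      intro hnil; rw [hnil] at hb; simp at hb
    obtain ⟨m, hm⟩ : ∃ m, PySem.List.min? (BY ++ BX) (fun x => x) = some m := by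
      cases hmm : PySem.List.min? (BY ++ BX) (fun x => x) with
      | none => exact absurd ((PySem.List.min?_eq_none_iff _ _).1 hmm) hne
      | some m => exact ⟨m, rfl⟩
    have hmmem : m ∈ BY ++ BX := PySem.List.min?_mem hm
    have hmin : ∀ b ∈ BY ++ BX, m ≤ b := fun b hb => PySem.List.min?_isMin hm b hb
    have hm0 : 0 ≤ m := (hBspec m hmmem).1
    have hP : ∀ n : Int, 0 ≤ n → n ≤ m → pvOnGrid (p.1 + n * sy, p.2 + n * sx) gs = true := by
      intro n hn hnm
      rw [pvOnGrid_ray_iff p sy sx gs hp n hn]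
      exact ⟨fun h => le_trans hnm (hmin _ (hmemY1 h)),
             fun h => le_trans hnm (hmin _ (hmemY2 h)),
             fun h => le_trans hnm (hmin _ (hmemX1 h)),
             fun h => le_trans hnm (hmin _ (hmemX2 h))⟩
    have hStop : pvOnGrid (p.1 + (m + 1) * sy, p.2 + (m + 1) * sx) gs = false := by
      by_contra hc
      have hc' : pvOnGrid (p.1 + (m + 1) * sy, p.2 + (m + 1) * sx) gs = true := by
        simpa using hc
      rw [pvOnGrid_ray_iff p sy sx gs hp (m + 1) (by omega)] at hc'
      -- m itself is one of the four bounds; the matching implication gives m + 1 ≤ m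
      rcases List.mem_append.1 hmmem with hb | hb
      · rw [hBY] at hb
        split_ifs at hb with h1 h2 <;> simp at hb
        · have := hc'.1 h1; omega
        · have := hc'.2.1 h2; omega
      · rw [hBX] at hb
        split_ifs at hb with h1 h2 <;> simp at hb
        · have := hc'.2.2.1 h1; omega
        · have := hc'.2.2.2 h2; omega
    have hfuel : (m + 1 - 0).toNat < gs.1.toNat + gs.2.toNat + 2 := by
      rcases (hBspec m hmmem) with ⟨_, h | h⟩ <;> omega
    rw [pvLoopA_run p (sy, sx) gs m hP hStop _ 0 acc (by omega) (by omega) hfuel]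
    simp only [pvRayAlt, hp, if_true]
    rw [← hBY, ← hBX, hm]

-- ===== VERDICT (by name: the statement is the Claim_ definition above) =====
theorem antinodes_from_pair_spec : Claim_equal_antinodes_from_pair := by
  intro a1 a2 gs h _ hpre
  unfold Spec_antinodes_from_pair
  cases h with
  | false =>
    simp only [antinodes_from_pair, antinodes_from_pair_alt, Bool.false_eq_true, if_false,
      List.filter_cons, List.filter_nil]
    split_ifs <;> simp_all
  | true =>
    have hab : ¬ (a1 = a2 ∧ pvOnGrid a1 gs = true) := fun hc => hpre ⟨rfl, hc⟩
    have haux : ∀ u v : Int, (u, v) = ((0:Int), (0:Int)) → u = 0 ∧ v = 0 := by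
      intro u v huv; exact ⟨congrArg Prod.fst huv, congrArg Prod.snd huv⟩
    have hd1 : ¬ ((a2.1 - a1.1, a2.2 - a1.2) = ((0:Int), (0:Int)) ∧ pvOnGrid a2 gs = true) := by
      rintro ⟨hz, hg⟩
      obtain ⟨h1, h2⟩ := haux _ _ hz
      have heq : a1 = a2 := by
        cases a1; cases a2; simp_all; omega
      exact hab ⟨heq, heq ▸ hg⟩
    have hd2 : ¬ ((-(a2.1 - a1.1), -(a2.2 - a1.2)) = ((0:Int), (0:Int)) ∧ pvOnGrid a1 gs = true) := by
      rintro ⟨hz, hg⟩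
      obtain ⟨h1, h2⟩ := haux _ _ hz
      have heq : a1 = a2 := by
        cases a1; cases a2; simp_all; omega
      exact hab ⟨heq, hg⟩
    simp only [antinodes_from_pair, antinodes_from_pair_alt, if_true]
    rw [pvLoopA_eq_ray a2 (a2.1 - a1.1) (a2.2 - a1.2) gs hd1 []]
    rw [pvLoopA_eq_ray a1 (-(a2.1 - a1.1)) (-(a2.2 - a1.2)) gs hd2 _]
    simp
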